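-- pv_equiv track=rewrite | github.com/luizmont5/Exerc-cios-Computabilidade-e-Complexidade-de-algoritmo | 10 questão/exercicio10.py | afn_0_seguido_de_1
-- ===== SOURCE A (Python) =====
-- def afn_0_seguido_de_1(entrada):
--     encontrou_0 = False
--
--     for simbolo in entrada:
--         if simbolo == '0':
--             encontrou_0 = True
--         elif simbolo == '1' and encontrou_0:
--             return True
--
--     return False
-- ===== SOURCE B (Python) =====
-- def afn_0_seguido_de_1(entrada):
--     s = list(entrada)
--     if '0' not in s or '1' not in s:
--         return False
--     return s.index('0') < len(s) - 1 - s[::-1].index('1')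
-- ===== Notes on version B (the rewrite author's own statement) =====
-- stated objective: faster
-- what changed: Instead of a character-by-character scan with a boolean flag, B compares positions: it tests membership of both symbols, then checks that the first index of the zero symbol lies strictly before the last index of the one symbol (computed via the reversed list), using C-level list primitives instead of an interpreted loop.
import Mathlib
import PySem

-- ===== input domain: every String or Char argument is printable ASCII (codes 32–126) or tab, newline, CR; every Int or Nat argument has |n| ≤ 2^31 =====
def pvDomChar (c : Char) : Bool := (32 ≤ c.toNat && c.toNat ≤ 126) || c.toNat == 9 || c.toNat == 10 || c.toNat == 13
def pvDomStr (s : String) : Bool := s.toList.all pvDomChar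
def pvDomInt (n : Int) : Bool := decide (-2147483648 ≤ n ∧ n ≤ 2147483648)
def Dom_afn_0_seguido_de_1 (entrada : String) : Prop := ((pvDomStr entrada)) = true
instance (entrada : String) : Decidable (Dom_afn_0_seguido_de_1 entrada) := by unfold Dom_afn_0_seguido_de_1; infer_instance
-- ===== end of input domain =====

-- ===== PORT A =====
-- B replaces A's boolean-flag scan by an index comparison: first index of '0' vs last index of '1'.
def afnALoop : List Char → Bool → Bool
  | [], _ => false
  | c :: cs, encontrou_0 =>
    if c = '0' then afnALoop cs true
    else if c = '1' ∧ encontrou_0 then true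
    else afnALoop cs encontrou_0

def afn_0_seguido_de_1 (entrada : String) : Bool := afnALoop entrada.toList false

-- ===== PORT B =====
-- Source B: s = list(entrada); if '0' not in s or '1' not in s: return False;
--       return s.index('0') < len(s) - 1 - s[::-1].index('1')
-- s[::-1] is PySem.List.slice? s none none (-1) (step -1 never raises); under the membership
-- guard both .index calls succeed, so the none branches below are unreachable.
def afn_0_seguido_de_1_alt (entrada : String) : Bool :=
  if ¬ ('0' ∈ entrada.toList) ∨ ¬ ('1' ∈ entrada.toList) then false
  else
    match PySem.List.index? entrada.toList '0',
          PySem.List.slice? entrada.toList none none (-1) with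
    | some i, some rev =>
      match PySem.List.index? rev '1' with
      | some j => decide ((i : Int) < (entrada.toList.length : Int) - 1 - (j : Int))
      | none => false
    | _, _ => false

-- ===== PRECONDITION & SPEC =====
def Spec_afn_0_seguido_de_1 (entrada : String) (out : Bool) : Prop := out = afn_0_seguido_de_1_alt entrada
instance (entrada : String) (out : Bool) : Decidable (Spec_afn_0_seguido_de_1 entrada out) := by unfold Spec_afn_0_seguido_de_1; infer_instance

-- ===== CLAIM (what is proved, stated in full; the proofs are below) =====
def Claim_equal_afn_0_seguido_de_1 : Prop := ∀ (entrada : String), Dom_afn_0_seguido_de_1 entrada → Spec_afn_0_seguido_de_1 entrada (afn_0_seguido_de_1 entrada)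

-- ===== LEMMAS AND PROOFS =====

-- A's loop in the 'found a 0' state just looks for a '1'.
lemma afnALoop_true (l : List Char) : afnALoop l true = decide ('1' ∈ l) := by
  induction l with
  | nil => rfl
  | cons c cs ih =>
    by_cases h0 : c = '0'
    · subst h0; simp [afnALoop, ih]
    · by_cases h1 : c = '1'
      · subst h1; simp [afnALoop, h0]
      · simp [afnALoop, h0, h1, ih, Ne.symm h1]

-- A's loop = "a '1' occurs strictly after the first '0'".
lemma afnALoop_false (l : List Char) :
    afnALoop l false = match PySem.List.index? l '0' with
      | some i => decide ('1' ∈ l.drop (i + 1))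
      | none => false := by
  induction l with
  | nil => rfl
  | cons c cs ih =>
    by_cases h0 : c = '0'
    · subst h0
      rw [PySem.List.index?_cons_self]
      simp [afnALoop, afnALoop_true]
    · rw [PySem.List.index?_cons_of_ne _ h0]
      have hstep : afnALoop (c :: cs) false = afnALoop cs false := by
        by_cases h1 : c = '1' <;> simp [afnALoop, h0, h1]
      rw [hstep, ih]
      cases h : PySem.List.index? cs '0' with
      | none => simp
      | some i => simp

-- first-occurrence index vs take: c is among the first t elements iff its first index is < t.
lemma mem_take_iff_index?_lt {c : Char} {r : List Char} {j : Nat}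
    (hj : PySem.List.index? r c = some j) (t : Nat) : c ∈ r.take t ↔ j < t := by
  obtain ⟨pre, suf, hr, hlen, hnot⟩ := (PySem.List.index?_eq_some_iff _ _ _).1 hj
  subst hr
  rw [List.take_append]
  constructor
  · intro hmem
    by_contra hle
    push Not at hle
    rcases List.mem_append.1 hmem with h | h
    · exact hnot (List.mem_of_mem_take h)
    · have h0 : t - pre.length = 0 := by omega
      rw [h0] at h; simp at h
  · intro hlt
    refine List.mem_append.2 (Or.inr ?_)
    have hpos : 0 < t - pre.length := by omega
    cases h : t - pre.length with
    | zero => omega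
    | succ n => simp [List.take_succ_cons]

-- position bookkeeping: a '1' strictly after position i iff i lies strictly before the last '1'
-- (whose position is length - 1 - j, j the first index of '1' in the reversed list).
lemma mem_drop_iff_idx {l : List Char} {i j : Nat}
    (hi : PySem.List.index? l '0' = some i)
    (hj : PySem.List.index? l.reverse '1' = some j) :
    ('1' ∈ l.drop (i + 1)) ↔ ((i : Int) < (l.length : Int) - 1 - (j : Int)) := by
  have hjlen : j < l.length := by
    obtain ⟨hk, -, -⟩ := PySem.List.getElem_of_index?_eq_some hj
    simpa using hk
  have h1 : ('1' ∈ l.drop (i + 1)) ↔ '1' ∈ (l.drop (i + 1)).reverse := by simp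
  rw [h1, List.reverse_drop, mem_take_iff_index?_lt hj]
  omega

-- ===== VERDICT (by name: the statement is the Claim_ definition above) =====
theorem afn_0_seguido_de_1_spec : Claim_equal_afn_0_seguido_de_1 := by
  intro entrada _
  show afn_0_seguido_de_1 entrada = afn_0_seguido_de_1_alt entrada
  unfold afn_0_seguido_de_1 afn_0_seguido_de_1_alt
  rw [afnALoop_false, PySem.List.slice?_none_none_neg_one]
  cases hi : PySem.List.index? entrada.toList '0' with
  | none =>
    have h0 : '0' ∉ entrada.toList := (PySem.List.index?_eq_none_iff _ _).1 hi
    rw [if_pos (Or.inl h0)]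
  | some i =>
    have h0 : '0' ∈ entrada.toList := by
      have h := PySem.List.index?_isSome_iff entrada.toList '0'
      rw [hi] at h; simpa using h
    by_cases h1 : '1' ∈ entrada.toList
    · rw [if_neg (by simp [h0, h1])]
      cases hj : PySem.List.index? entrada.toList.reverse '1' with
      | none =>
        exact absurd ((PySem.List.index?_eq_none_iff _ _).1 hj) (by simpa using h1)
      | some j =>
        simp only [hj]
        exact decide_eq_decide.2 (mem_drop_iff_idx hi hj)
    · rw [if_pos (Or.inr h1)]
      have hnd : '1' ∉ entrada.toList.drop (i + 1) :=
        fun hm => h1 (List.mem_of_mem_drop hm)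
      simp [hnd]
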